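-- pv_equiv track=rewrite | github.com/Todah01/Algorithm_Python | week_5/05_samsung_test_2.py | is_available_to_take_out_only_red_marble
-- ===== SOURCE A (Python) =====
-- from collections import deque
--
-- dr = [1, -1, 0, 0]
--
-- dc = [0, 0, 1, -1]
--
-- def move_until_to_wall_or_hole(row, col, diff_r, diff_c, temp_map):
--     move_cnt = 0
--
--     while temp_map[row][col] != 'O' and temp_map[row + diff_r][col + diff_c] != '#':
--         row += diff_r
--         col += diff_c
--         move_cnt += 1
--
--     return row, col, move_cnt
--
-- def is_available_to_take_out_only_red_marble(game_map):
--     n, m = len(game_map), len(game_map[0])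
--     visited = [[[[False] * m for _ in range(n)] for _ in range(m)] for _ in range(n)]
--
--     queue = deque()
--     red_row, red_col, blue_row, blue_col = -1, -1, -1, -1
--
--     for i in range(n):
--         for j in range(m):
--             if game_map[i][j] == 'R':
--                 red_row, red_col = i, j
--             elif game_map[i][j] == 'B':
--                 blue_row, blue_col = i, j
--
--     queue.append((red_row, red_col, blue_row, blue_col, 0))
--     visited[red_row][red_col][blue_row][blue_col] = True
--
--     while queue:
--         red_row, red_col, blue_row, blue_col, lean_cnt = queue.popleft()
--         if lean_cnt > 10:
--             break
--
--         for i in range(4):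
--             new_red_row, new_red_col, r_cnt = move_until_to_wall_or_hole(red_row, red_col, dr[i], dc[i], game_map)
--             new_blue_row, new_blue_col, b_cnt = move_until_to_wall_or_hole(blue_row, blue_col, dr[i], dc[i], game_map)
--
--             if game_map[new_blue_row][new_blue_col] == 'O':
--                 continue
--             if game_map[new_red_row][new_red_col] == 'O':
--                 return True
--             if new_red_row == new_blue_row and new_red_col == new_blue_col:
--                 if r_cnt > b_cnt:
--                     new_red_row -= dr[i]
--                     new_red_col -= dc[i]
--                 elif b_cnt > r_cnt:
--                     new_blue_row -= dr[i]
--                     new_blue_col -= dc[i]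
--
--             if not visited[new_red_row][new_red_col][new_blue_row][new_blue_col]:
--                 visited[new_red_row][new_red_col][new_blue_row][new_blue_col] = True
--                 queue.append((new_red_row, new_red_col, new_blue_row, new_blue_col, lean_cnt+1))
--
--     return False
-- ===== SOURCE B (Python) =====
-- def is_available_to_take_out_only_red_marble(game_map):
--     n, m = len(game_map), len(game_map[0])
--
--     red_row, red_col, blue_row, blue_col = -1, -1, -1, -1
--     for i in range(n):
--         for j in range(m):
--             if game_map[i][j] == 'R':
--                 red_row, red_col = i, j
--             elif game_map[i][j] == 'B':
--                 blue_row, blue_col = i, j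
--
--     def roll(row, col, diff_r, diff_c):
--         cnt = 0
--         while game_map[row][col] != 'O' and game_map[row + diff_r][col + diff_c] != '#':
--             row += diff_r
--             col += diff_c
--             cnt += 1
--         return row, col, cnt
--
--     def dfs(rr, rc, br, bc, depth):
--         if depth > 10:
--             return False
--         for diff_r, diff_c in ((1, 0), (-1, 0), (0, 1), (0, -1)):
--             nrr, nrc, r_cnt = roll(rr, rc, diff_r, diff_c)
--             nbr, nbc, b_cnt = roll(br, bc, diff_r, diff_c)
--             if game_map[nbr][nbc] == 'O':
--                 continue
--             if game_map[nrr][nrc] == 'O':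
--                 return True
--             if nrr == nbr and nrc == nbc:
--                 if r_cnt > b_cnt:
--                     nrr -= diff_r
--                     nrc -= diff_c
--                 elif b_cnt > r_cnt:
--                     nbr -= diff_r
--                     nbc -= diff_c
--             if (nrr, nrc, nbr, nbc) == (rr, rc, br, bc):
--                 continue  # a no-op roll; a shortest winning sequence never uses one
--             if dfs(nrr, nrc, nbr, nbc, depth + 1):
--                 return True
--         return False
--
--     return dfs(red_row, red_col, blue_row, blue_col, 0)
-- ===== Notes on version B (the rewrite author's own statement) =====
-- stated objective: alternative
-- what changed: Replaces A's breadth-first search (deque of states with a depth counter plus a 4D visited array) by a recursive depth-limited DFS that keeps no visited structure at all and only skips rolls that leave both marbles in place; bounded reachability within 10 rolls is unchanged by dropping the pruning.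
-- outside the precondition, e.g. on is_available_to_take_out_only_red_marble(['B#', '# O #']): A returns True, B returns True; on is_available_to_take_out_only_red_marble(['#', 'Oa']): A returns False, B returns False
import Mathlib
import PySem

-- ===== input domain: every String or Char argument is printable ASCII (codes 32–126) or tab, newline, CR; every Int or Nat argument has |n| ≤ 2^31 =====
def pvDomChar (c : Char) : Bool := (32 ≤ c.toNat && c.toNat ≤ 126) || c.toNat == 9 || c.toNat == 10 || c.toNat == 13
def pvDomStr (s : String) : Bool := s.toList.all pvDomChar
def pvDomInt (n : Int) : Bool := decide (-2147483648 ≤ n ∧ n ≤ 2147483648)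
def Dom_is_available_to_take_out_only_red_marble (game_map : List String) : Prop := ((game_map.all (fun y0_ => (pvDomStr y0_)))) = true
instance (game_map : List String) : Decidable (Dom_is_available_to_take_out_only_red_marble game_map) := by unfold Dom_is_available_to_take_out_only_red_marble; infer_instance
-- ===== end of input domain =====

-- B replaces A's breadth-first search (deque + 4D visited array) by a recursive
-- depth-limited DFS with NO visited table (it only skips rolls that leave both marbles in
-- place); bounded reachability is the same with or without pruning (objective: alternative,
-- no speed claim).

-- ===== PORT A =====
-- A-side helpers: the cell lookup, the marble-roll `while` loop and the R/B scan

-- game_map[r][c] as Python computes it (negative indices wrap); none = IndexError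
def pvLook (g : List String) (r c : Int) : Option Char :=
  match PySem.List.pyGet? g r with
  | some s => PySem.Str.pyGet? s c
  | none => none

-- the `while` loop of move_until_to_wall_or_hole / roll; `fuel` only totalizes the loop:
-- inside Pre_ the board is wall-bordered, the loop stops after < n+m steps and a none
-- lookup (Python: IndexError) never occurs, so the fuel guard is never reached there.
def pvMove (g : List String) : Nat → Int → Int → Int → Int → Int → Int × Int × Int
  | 0, row, col, _, _, cnt => (row, col, cnt)
  | fuel + 1, row, col, dr, dc, cnt =>
    if pvLook g row col ≠ some 'O' ∧ pvLook g (row + dr) (col + dc) ≠ some '#' then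
      pvMove g fuel (row + dr) (col + dc) dr dc (cnt + 1)
    else (row, col, cnt)

-- the nested `for i in range(n): for j in range(m):` scan for the (last) 'R' and 'B'
def pvScan (g : List String) (n m : Nat) : Int × Int × Int × Int :=
  (List.range n).foldl
    (fun st i =>
      (List.range m).foldl
        (fun st j =>
          if pvLook g (i : Int) (j : Int) = some 'R' then ((i : Int), (j : Int), st.2.2.1, st.2.2.2)
          else if pvLook g (i : Int) (j : Int) = some 'B' then (st.1, st.2.1, (i : Int), (j : Int))
          else st)
        st)
    (-1, -1, -1, -1)

def pvDirs : List (Int × Int) := [(1, 0), (-1, 0), (0, 1), (0, -1)]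

-- maximal row length and the roll-fuel bound shared by both ports (a terminating roll
-- takes fewer than 2*(n+L) steps even from a negatively-wrapped start position)
def pvMaxLen (g : List String) : Nat := g.foldl (fun k s => max k (PySem.Str.len s).toNat) 0

def pvBound (g : List String) : Nat := 2 * (g.length + pvMaxLen g) + 2

-- A's inner `for i in range(4)` loop over one dequeued state: `none` = `return True`,
-- otherwise the updated (queue, visited).
def pvDirLoopA (g : List String) (fm : Nat) (rr rc br bc cnt : Int) :
    List (Int × Int) → List ((Int × Int × Int × Int) × Int) → PySem.Set (Int × Int × Int × Int) →
    Option (List ((Int × Int × Int × Int) × Int) × PySem.Set (Int × Int × Int × Int))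
  | [], q, vis => some (q, vis)
  | (dri, dci) :: ds, q, vis =>
    let mr := pvMove g fm rr rc dri dci 0
    let mb := pvMove g fm br bc dri dci 0
    if pvLook g mb.1 mb.2.1 = some 'O' then pvDirLoopA g fm rr rc br bc cnt ds q vis
    else if pvLook g mr.1 mr.2.1 = some 'O' then none
    else
      let st :=
        if mr.1 = mb.1 ∧ mr.2.1 = mb.2.1 then
          if mr.2.2 > mb.2.2 then (mr.1 - dri, mr.2.1 - dci, mb.1, mb.2.1)
          else if mb.2.2 > mr.2.2 then (mr.1, mr.2.1, mb.1 - dri, mb.2.1 - dci)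
          else (mr.1, mr.2.1, mb.1, mb.2.1)
        else (mr.1, mr.2.1, mb.1, mb.2.1)
      if st ∈ vis then pvDirLoopA g fm rr rc br bc cnt ds q vis
      else pvDirLoopA g fm rr rc br bc cnt ds (q ++ [(st, cnt + 1)]) (vis.add st)

-- A's `while queue:` loop; the fuel 4^12 strictly dominates the number of pops
-- (each pop enqueues at most 4 states and at most 11 levels are ever popped).
def pvBfsA (g : List String) (fm : Nat) :
    Nat → List ((Int × Int × Int × Int) × Int) → PySem.Set (Int × Int × Int × Int) → Bool
  | 0, _, _ => false
  | _ + 1, [], _ => false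
  | fuel + 1, (s, cnt) :: rest, vis =>
    if cnt > 10 then false
    else
      match pvDirLoopA g fm s.1 s.2.1 s.2.2.1 s.2.2.2 cnt pvDirs rest vis with
      | none => true
      | some (q', vis') => pvBfsA g fm fuel q' vis'

def is_available_to_take_out_only_red_marble (game_map : List String) : Bool :=
  let n := game_map.length
  let m := (game_map.headD "").length
  let s := pvScan game_map n m
  pvBfsA game_map (pvBound game_map) 16777216 [(s, 0)] (PySem.Set.ofList [s])

-- ===== PORT B =====
-- B's recursive `dfs`: fuel = 11 - depth (the `depth > 10` guard is fuel 0); the `for`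
-- loop over the four directions with its `continue`/`return True`/recursive call is the
-- short-circuiting `List.any`.
def pvDfs (g : List String) (fm : Nat) : Nat → Int × Int × Int × Int → Bool
  | 0, _ => false
  | k + 1, s =>
    pvDirs.any (fun d =>
      let mr := pvMove g fm s.1 s.2.1 d.1 d.2 0
      let mb := pvMove g fm s.2.2.1 s.2.2.2 d.1 d.2 0
      if pvLook g mb.1 mb.2.1 = some 'O' then false
      else if pvLook g mr.1 mr.2.1 = some 'O' then true
      else
        let st :=
          if mr.1 = mb.1 ∧ mr.2.1 = mb.2.1 then
            if mr.2.2 > mb.2.2 then (mr.1 - d.1, mr.2.1 - d.2, mb.1, mb.2.1)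
            else if mb.2.2 > mr.2.2 then (mr.1, mr.2.1, mb.1 - d.1, mb.2.1 - d.2)
            else (mr.1, mr.2.1, mb.1, mb.2.1)
          else (mr.1, mr.2.1, mb.1, mb.2.1)
        if st = s then false else pvDfs g fm k st)

def is_available_to_take_out_only_red_marble_alt (game_map : List String) : Bool :=
  let n := game_map.length
  let m := (game_map.headD "").length
  let s := pvScan game_map n m
  pvDfs game_map (pvBound game_map) 11 s

-- ===== PRECONDITION & SPEC =====
-- helpers for Pre_: the marble positions A's scan finds, and static descriptions of one
-- marble roll as bounded index/character conditions (no recursion): a roll from (r,c) in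
-- direction (dr,dc) stops after exactly t steps iff every cell strictly before step t lets
-- it pass and the cell at step t is a hole or has a wall behind it.
def pvM (g : List String) : Nat := (PySem.Str.len (g.headD "")).toNat

def pvRB (g : List String) : (Int × Int) × (Int × Int) :=
  (((pvScan g g.length (pvM g)).1, (pvScan g g.length (pvM g)).2.1),
   ((pvScan g g.length (pvM g)).2.2.1, (pvScan g g.length (pvM g)).2.2.2))

def pvStopAt (g : List String) (r c dr dc : Int) (t : Nat) : Bool :=
  (pvLook g (r + dr * t) (c + dc * t)).isSome &&
  (decide (pvLook g (r + dr * t) (c + dc * t) = some 'O') ||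
    decide (pvLook g (r + dr * (t + 1)) (c + dc * (t + 1)) = some '#'))

def pvPathOK (g : List String) (r c dr dc : Int) (t : Nat) : Bool :=
  (List.range t).all fun u =>
    (pvLook g (r + dr * u) (c + dc * u)).isSome &&
    !decide (pvLook g (r + dr * u) (c + dc * u) = some 'O') &&
    (pvLook g (r + dr * (u + 1)) (c + dc * (u + 1))).isSome &&
    !decide (pvLook g (r + dr * (u + 1)) (c + dc * (u + 1)) = some '#')

def pvRollStops (g : List String) (r c dr dc : Int) : Bool :=
  (List.range (pvBound g)).any fun t => pvStopAt g r c dr dc t && pvPathOK g r c dr dc t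

def pvRollLandsOnHole (g : List String) (r c dr dc : Int) (hole : Bool) : Bool :=
  (List.range (pvBound g)).any fun t =>
    pvStopAt g r c dr dc t && pvPathOK g r c dr dc t &&
    (decide (pvLook g (r + dr * t) (c + dc * t) = some 'O') == hole)

-- family E: A's very first dequeued state already decides the answer: in direction order,
-- both marbles' rolls stay on the board and each direction either continues (blue ends in
-- the hole), wins (blue does not, red does - A returns True), or the chain must have ended;
-- if all four directions continue, nothing is enqueued and A returns False
def pvWinDir (g : List String) (rr rc br bc dr dc : Int) : Bool :=
  pvRollLandsOnHole g br bc dr dc false && pvRollLandsOnHole g rr rc dr dc true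

def pvContDir (g : List String) (rr rc br bc dr dc : Int) : Bool :=
  pvRollStops g rr rc dr dc && pvRollLandsOnHole g br bc dr dc true

def pvFamE (g : List String) : Bool :=
  pvWinDir g (pvRB g).1.1 (pvRB g).1.2 (pvRB g).2.1 (pvRB g).2.2 1 0 ||
    (pvContDir g (pvRB g).1.1 (pvRB g).1.2 (pvRB g).2.1 (pvRB g).2.2 1 0 &&
      (pvWinDir g (pvRB g).1.1 (pvRB g).1.2 (pvRB g).2.1 (pvRB g).2.2 (-1) 0 ||
        (pvContDir g (pvRB g).1.1 (pvRB g).1.2 (pvRB g).2.1 (pvRB g).2.2 (-1) 0 &&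
          (pvWinDir g (pvRB g).1.1 (pvRB g).1.2 (pvRB g).2.1 (pvRB g).2.2 0 1 ||
            (pvContDir g (pvRB g).1.1 (pvRB g).1.2 (pvRB g).2.1 (pvRB g).2.2 0 1 &&
              (pvWinDir g (pvRB g).1.1 (pvRB g).1.2 (pvRB g).2.1 (pvRB g).2.2 0 (-1) ||
                pvContDir g (pvRB g).1.1 (pvRB g).1.2 (pvRB g).2.1 (pvRB g).2.2 0 (-1)))))))

-- family D: a proper game board — rectangular, fully bordered by '#' walls, containing
-- both marbles (A's whole search then stays on the board)
def pvFamD (g : List String) : Bool :=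
  decide (3 ≤ g.length) && decide (3 ≤ pvM g) &&
  g.all (fun s => decide (PySem.Str.len s = PySem.Str.len (g.headD ""))) &&
  decide (PySem.Str.count (g.headD "") "#" = PySem.Str.len (g.headD "")) &&
  decide (PySem.Str.count (g.getLastD "") "#" = PySem.Str.len (g.getLastD "")) &&
  g.all (fun s => PySem.Str.startswith s "#" && PySem.Str.endswith s "#") &&
  g.any (fun s => PySem.Str.isIn "R" s) &&
  g.any (fun s => PySem.Str.isIn "B" s)

-- Pre_ admits boards on which A provably completes: a non-ragged board (so the R/B scan
-- cannot raise) belonging to one of the two families above. Outside Pre_, A almost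
-- always raises IndexError (a roll or the scan runs off the board); on some remaining
-- garbage boards A still happens to return (see cites) and B returns the same value there,
-- but no short closed-form condition separates those from the raising ones.
def Pre_is_available_to_take_out_only_red_marble (game_map : List String) : Prop :=
  game_map ≠ [] ∧ 1 ≤ pvM game_map ∧
  (∀ s ∈ game_map, (pvM game_map : Int) ≤ PySem.Str.len s) ∧
  (pvFamE game_map || pvFamD game_map) = true
instance (game_map : List String) : Decidable (Pre_is_available_to_take_out_only_red_marble game_map) := by
  unfold Pre_is_available_to_take_out_only_red_marble; infer_instance

def pvWitness_is_available_to_take_out_only_red_marble : List String :=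
  ["#####", "#RB.#", "#..O#", "#####"]

def Spec_is_available_to_take_out_only_red_marble (game_map : List String) (out : Bool) : Prop := out = is_available_to_take_out_only_red_marble_alt game_map
instance (game_map : List String) (out : Bool) : Decidable (Spec_is_available_to_take_out_only_red_marble game_map out) := by unfold Spec_is_available_to_take_out_only_red_marble; infer_instance

-- ===== CLAIM (what is proved, stated in full; the proofs are below) =====
def Claim_equal_is_available_to_take_out_only_red_marble : Prop := ∀ (game_map : List String), Dom_is_available_to_take_out_only_red_marble game_map → Pre_is_available_to_take_out_only_red_marble game_map → Spec_is_available_to_take_out_only_red_marble game_map (is_available_to_take_out_only_red_marble game_map)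

-- ===== LEMMAS AND PROOFS =====

-- === shared one-move abstractions: per direction, a move either wins, is skipped, or
-- === yields a child state; both searches decide 'win within k moves' (pvWins) ===

def pvWinDb (g : List String) (fm : Nat) (s : Int × Int × Int × Int) (d : Int × Int) : Bool :=
  let mr := pvMove g fm s.1 s.2.1 d.1 d.2 0
  let mb := pvMove g fm s.2.2.1 s.2.2.2 d.1 d.2 0
  !decide (pvLook g mb.1 mb.2.1 = some 'O') && decide (pvLook g mr.1 mr.2.1 = some 'O')

def pvChildD (g : List String) (fm : Nat) (s : Int × Int × Int × Int) (d : Int × Int) :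
    Option (Int × Int × Int × Int) :=
  let mr := pvMove g fm s.1 s.2.1 d.1 d.2 0
  let mb := pvMove g fm s.2.2.1 s.2.2.2 d.1 d.2 0
  if pvLook g mb.1 mb.2.1 = some 'O' then none
  else if pvLook g mr.1 mr.2.1 = some 'O' then none
  else some
    (if mr.1 = mb.1 ∧ mr.2.1 = mb.2.1 then
       if mr.2.2 > mb.2.2 then (mr.1 - d.1, mr.2.1 - d.2, mb.1, mb.2.1)
       else if mb.2.2 > mr.2.2 then (mr.1, mr.2.1, mb.1 - d.1, mb.2.1 - d.2)
       else (mr.1, mr.2.1, mb.1, mb.2.1)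
     else (mr.1, mr.2.1, mb.1, mb.2.1))

def pvWin (g : List String) (fm : Nat) (s : Int × Int × Int × Int) : Bool :=
  pvDirs.any (pvWinDb g fm s)

def pvChildren (g : List String) (fm : Nat) (s : Int × Int × Int × Int) :
    List (Int × Int × Int × Int) :=
  pvDirs.filterMap (pvChildD g fm s)

def pvWins (g : List String) (fm : Nat) : Nat → Int × Int × Int × Int → Bool
  | 0, _ => false
  | k + 1, s => pvWin g fm s || (pvChildren g fm s).any (pvWins g fm k)

theorem pvWins_mono {g : List String} {fm : Nat} :
    ∀ (k : Nat) (s : Int × Int × Int × Int), pvWins g fm k s = true → pvWins g fm (k + 1) s = true := by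
  intro k
  induction k with
  | zero => intro s h; exact absurd h (by simp [pvWins])
  | succ k ih =>
    intro s h
    rw [pvWins] at h ⊢
    simp only [Bool.or_eq_true, List.any_eq_true] at h ⊢
    rcases h with h | ⟨c, hc, hw⟩
    · exact Or.inl h
    · exact Or.inr ⟨c, hc, ih c hw⟩

theorem pvWins_noself {g : List String} {fm : Nat} :
    ∀ (k : Nat) (s : Int × Int × Int × Int), pvWins g fm (k + 1) s = true →
      pvWin g fm s = true ∨ ∃ c ∈ pvChildren g fm s, c ≠ s ∧ pvWins g fm k c = true := by
  intro k
  induction k using Nat.strong_induction_on with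
  | _ k ih =>
    intro s h
    rw [pvWins] at h
    simp only [Bool.or_eq_true, List.any_eq_true] at h
    rcases h with h | ⟨c, hc, hw⟩
    · exact Or.inl h
    · by_cases hcs : c = s
      · subst hcs
        cases k with
        | zero => exact absurd hw (by simp [pvWins])
        | succ k' =>
          rcases ih k' (by omega) c hw with h | ⟨c', hc', hne, hw'⟩
          · exact Or.inl h
          · exact Or.inr ⟨c', hc', hne, pvWins_mono k' c' hw'⟩
      · exact Or.inr ⟨c, hc, hcs, hw⟩

-- === B's DFS computes pvWins ===

-- the body of pvDfs's direction loop, named so the `List.any` can be reasoned about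
def pvBodyDfs (g : List String) (fm k : Nat) (s : Int × Int × Int × Int) (d : Int × Int) : Bool :=
  let mr := pvMove g fm s.1 s.2.1 d.1 d.2 0
  let mb := pvMove g fm s.2.2.1 s.2.2.2 d.1 d.2 0
  if pvLook g mb.1 mb.2.1 = some 'O' then false
  else if pvLook g mr.1 mr.2.1 = some 'O' then true
  else
    let st :=
      if mr.1 = mb.1 ∧ mr.2.1 = mb.2.1 then
        if mr.2.2 > mb.2.2 then (mr.1 - d.1, mr.2.1 - d.2, mb.1, mb.2.1)
        else if mb.2.2 > mr.2.2 then (mr.1, mr.2.1, mb.1 - d.1, mb.2.1 - d.2)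
        else (mr.1, mr.2.1, mb.1, mb.2.1)
      else (mr.1, mr.2.1, mb.1, mb.2.1)
    if st = s then false else pvDfs g fm k st

theorem pvDfs_succ_def {g : List String} {fm k : Nat} {s : Int × Int × Int × Int} :
    pvDfs g fm (k + 1) s = pvDirs.any (pvBodyDfs g fm k s) := rfl

theorem pvBodyDfs_eq {g : List String} {fm k : Nat} {s : Int × Int × Int × Int} {d : Int × Int} :
    pvBodyDfs g fm k s d =
      (if pvWinDb g fm s d = true then true
       else
         match pvChildD g fm s d with
         | none => false
         | some st => if st = s then false else pvDfs g fm k st) := by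
  by_cases h1 : pvLook g (pvMove g fm s.2.2.1 s.2.2.2 d.1 d.2 0).1
      (pvMove g fm s.2.2.1 s.2.2.2 d.1 d.2 0).2.1 = some 'O'
  · simp [pvBodyDfs, pvWinDb, pvChildD, h1]
  · by_cases h2 : pvLook g (pvMove g fm s.1 s.2.1 d.1 d.2 0).1
        (pvMove g fm s.1 s.2.1 d.1 d.2 0).2.1 = some 'O'
    · simp [pvBodyDfs, pvWinDb, pvChildD, h1, h2]
    · simp [pvBodyDfs, pvWinDb, pvChildD, h1, h2]

theorem pvDfs_succ_iff {g : List String} {fm : Nat} {k : Nat} {s : Int × Int × Int × Int} :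
    pvDfs g fm (k + 1) s = true ↔
      pvWin g fm s = true ∨ ∃ c ∈ pvChildren g fm s, c ≠ s ∧ pvDfs g fm k c = true := by
  rw [pvDfs_succ_def]
  simp only [List.any_eq_true]
  constructor
  · rintro ⟨d, hd, hb⟩
    rw [pvBodyDfs_eq] at hb
    by_cases hw : pvWinDb g fm s d = true
    · exact Or.inl (by rw [pvWin, List.any_eq_true]; exact ⟨d, hd, hw⟩)
    · rw [if_neg hw] at hb
      cases hc : pvChildD g fm s d with
      | none =>
        rw [hc] at hb
        have hb' : false = true := hb
        cases hb'
      | some st =>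
        rw [hc] at hb
        have hb' : (if st = s then false else pvDfs g fm k st) = true := hb
        by_cases h3 : st = s
        · rw [if_pos h3] at hb'; cases hb'
        · rw [if_neg h3] at hb'
          exact Or.inr ⟨st, List.mem_filterMap.mpr ⟨d, hd, hc⟩, h3, hb'⟩
  · rintro (hwin | ⟨c, hcmem, hne, hdfs⟩)
    · rw [pvWin, List.any_eq_true] at hwin
      obtain ⟨d, hd, hw⟩ := hwin
      exact ⟨d, hd, by rw [pvBodyDfs_eq, if_pos hw]⟩
    · obtain ⟨d, hd, hcd⟩ := List.mem_filterMap.mp hcmem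
      refine ⟨d, hd, ?_⟩
      rw [pvBodyDfs_eq]
      have hw : ¬ pvWinDb g fm s d = true := by
        intro hwt
        simp only [pvWinDb, Bool.and_eq_true, Bool.not_eq_true', decide_eq_true_eq,
          decide_eq_false_iff_not] at hwt
        simp [pvChildD, hwt.1, hwt.2] at hcd
      rw [if_neg hw, hcd]
      show (if c = s then false else pvDfs g fm k c) = true
      rw [if_neg hne]
      exact hdfs

theorem pvDfs_eq_wins {g : List String} {fm : Nat} :
    ∀ (k : Nat) (s : Int × Int × Int × Int), pvDfs g fm k s = pvWins g fm k s := by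
  intro k
  induction k using Nat.strong_induction_on with
  | _ k ih =>
    intro s
    cases k with
    | zero => rfl
    | succ k =>
      have hiff : pvDfs g fm (k + 1) s = true ↔ pvWins g fm (k + 1) s = true := by
        rw [pvDfs_succ_iff]
        constructor
        · rintro (hwin | ⟨c, hc, _, hdfs⟩)
          · rw [pvWins]; simp [hwin]
          · rw [pvWins]
            simp only [Bool.or_eq_true, List.any_eq_true]
            exact Or.inr ⟨c, hc, by rw [← ih k (by omega) c]; exact hdfs⟩
        · intro hw
          rcases pvWins_noself k s hw with hwin | ⟨c, hc, hne, hwc⟩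
          · exact Or.inl hwin
          · exact Or.inr ⟨c, hc, hne, by rw [ih k (by omega) c]; exact hwc⟩
      cases h : pvWins g fm (k + 1) s with
      | true => exact hiff.mpr h
      | false =>
        cases h2 : pvDfs g fm (k + 1) s with
        | false => rfl
        | true => exact absurd (hiff.mp h2) (by simp [h])

-- === the proof-side level-synchronous BFS; A's queue machine is bridged to it (pvBfsA_sim)
-- === and it in turn computes pvWins (pvLevel_iff) ===

def pvDirLoopB (g : List String) (fm : Nat) (rr rc br bc : Int) :
    List (Int × Int) → PySem.Set (Int × Int × Int × Int) → List (Int × Int × Int × Int) →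
    Option (PySem.Set (Int × Int × Int × Int) × List (Int × Int × Int × Int))
  | [], vis, acc => some (vis, acc)
  | (dri, dci) :: ds, vis, acc =>
    let mr := pvMove g fm rr rc dri dci 0
    let mb := pvMove g fm br bc dri dci 0
    if pvLook g mb.1 mb.2.1 = some 'O' then pvDirLoopB g fm rr rc br bc ds vis acc
    else if pvLook g mr.1 mr.2.1 = some 'O' then none
    else
      let st :=
        if mr.1 = mb.1 ∧ mr.2.1 = mb.2.1 then
          if mr.2.2 > mb.2.2 then (mr.1 - dri, mr.2.1 - dci, mb.1, mb.2.1)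
          else if mb.2.2 > mr.2.2 then (mr.1, mr.2.1, mb.1 - dri, mb.2.1 - dci)
          else (mr.1, mr.2.1, mb.1, mb.2.1)
        else (mr.1, mr.2.1, mb.1, mb.2.1)
      if st ∈ vis then pvDirLoopB g fm rr rc br bc ds vis acc
      else pvDirLoopB g fm rr rc br bc ds (vis.add st) (acc ++ [st])

def pvFrontLoopB (g : List String) (fm : Nat) :
    List (Int × Int × Int × Int) → PySem.Set (Int × Int × Int × Int) → List (Int × Int × Int × Int) →
    Option (PySem.Set (Int × Int × Int × Int) × List (Int × Int × Int × Int))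
  | [], vis, acc => some (vis, acc)
  | s :: L, vis, acc =>
    match pvDirLoopB g fm s.1 s.2.1 s.2.2.1 s.2.2.2 pvDirs vis acc with
    | none => none
    | some (vis', acc') => pvFrontLoopB g fm L vis' acc'

def pvLevelLoopB (g : List String) (fm : Nat) :
    Nat → PySem.Set (Int × Int × Int × Int) → List (Int × Int × Int × Int) → Bool
  | 0, _, _ => false
  | k + 1, vis, frontier =>
    match pvFrontLoopB g fm frontier vis [] with
    | none => true
    | some (vis', next) => pvLevelLoopB g fm k vis' next

-- per-state fuel budget for level depth k: pvPot k pops cover a state whose subtree may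
-- still expand for k more levels (each pop spawns at most 4 children one level deeper)
def pvPot : Nat → Nat
  | 0 => 1
  | k + 1 => 1 + 4 * pvPot k

theorem pvDirLoopB_len {g : List String} {fm : Nat} {rr rc br bc : Int} :
    ∀ (ds : List (Int × Int)) (vis : PySem.Set (Int × Int × Int × Int))
      (acc : List (Int × Int × Int × Int)) vis' acc',
      pvDirLoopB g fm rr rc br bc ds vis acc = some (vis', acc') →
      acc'.length ≤ acc.length + ds.length := by
  intro ds
  induction ds with
  | nil => intro vis acc vis' acc' h; simp [pvDirLoopB] at h; simp [h.2]
  | cons d ds ih =>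
    intro vis acc vis' acc' h
    obtain ⟨dri, dci⟩ := d
    simp only [pvDirLoopB] at h
    split_ifs at h <;>
      first
      | exact absurd h (by simp)
      | (have := ih _ _ _ _ h; simp only [List.length_append, List.length_cons,
          List.length_nil] at this ⊢; omega)

-- A's inner loop on queue `q ++ acc.map (·, cnt+1)` is the level loop's inner loop on acc
theorem pvDirLoop_bridge {g : List String} {fm : Nat} {rr rc br bc cnt : Int} :
    ∀ (ds : List (Int × Int)) (q : List ((Int × Int × Int × Int) × Int))
      (vis : PySem.Set (Int × Int × Int × Int)) (acc : List (Int × Int × Int × Int)),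
      pvDirLoopA g fm rr rc br bc cnt ds (q ++ acc.map (fun s => (s, cnt + 1))) vis =
        (pvDirLoopB g fm rr rc br bc ds vis acc).map
          (fun p => (q ++ p.2.map (fun s => (s, cnt + 1)), p.1)) := by
  intro ds
  induction ds with
  | nil => intro q vis acc; simp [pvDirLoopA, pvDirLoopB]
  | cons d ds ih =>
    intro q vis acc
    obtain ⟨dri, dci⟩ := d
    simp only [pvDirLoopA, pvDirLoopB]
    split_ifs <;>
      first
      | rfl
      | exact ih q vis acc
      | (refine Eq.trans ?_ (ih q _ _); simp [List.append_assoc])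

-- any queue whose first entry carries count 11 makes A stop with False (the `break`)
theorem pvBfsA_level11 {g : List String} {fm : Nat} :
    ∀ (fuel : Nat) (N : List (Int × Int × Int × Int)) vis,
      pvBfsA g fm fuel (N.map (fun s => (s, (11 : Int)))) vis = false := by
  intro fuel N vis
  cases fuel with
  | zero => rfl
  | succ f =>
    cases N with
    | nil => rfl
    | cons s N => norm_num [pvBfsA]

-- the queue simulation: A's queue holds the rest of the current level (count 10-c)
-- followed by the next level built so far (count 11-c); that is the level loop's (L, acc=N).
theorem pvBfsA_sim {g : List String} {fm : Nat} :
    ∀ (c : Nat) (L N : List (Int × Int × Int × Int)) (vis : PySem.Set (Int × Int × Int × Int)) (fuel : Nat),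
      L.length * pvPot (c + 1) + N.length * pvPot c + 1 ≤ fuel →
      pvBfsA g fm fuel
        (L.map (fun s => (s, (10 : Int) - (c : Int))) ++ N.map (fun s => (s, (11 : Int) - (c : Int)))) vis =
        (match pvFrontLoopB g fm L vis N with
         | none => true
         | some (vis', next) => pvLevelLoopB g fm c vis' next) := by
  intro c L N vis fuel hf
  induction c generalizing L N vis fuel with
  | zero =>
    induction L generalizing N vis fuel with
    | nil =>
      have h11 : ((11 : Int) - ((0 : Nat) : Int)) = 11 := by norm_num
      simpa [pvFrontLoopB, pvLevelLoopB, h11] using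
        pvBfsA_level11 (g := g) (fm := fm) fuel N vis
    | cons s L ihL =>
      have hpos : 1 ≤ fuel := le_trans (by omega) hf
      cases fuel with
      | zero => omega
      | succ f =>
        have e2 : (fun s : Int × Int × Int × Int => (s, (11 : Int) - ((0 : Nat) : Int))) =
            (fun s : Int × Int × Int × Int => (s, ((10 : Int) - ((0 : Nat) : Int)) + 1)) := by
          funext s; norm_num
        simp only [List.map_cons, List.cons_append, pvBfsA]
        rw [if_neg (by norm_num : ¬ ((10 : Int) - ((0 : Nat) : Int) > 10)), e2,
          pvDirLoop_bridge]
        cases h : pvDirLoopB g fm s.1 s.2.1 s.2.2.1 s.2.2.2 pvDirs vis N with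
        | none => simp [pvFrontLoopB, h]
        | some p =>
          obtain ⟨vis', acc'⟩ := p
          have hlen := pvDirLoopB_len pvDirs vis N vis' acc' h
          have hq : pvPot (0 + 1) = 1 + 4 * pvPot 0 := rfl
          have h2 : acc'.length * pvPot 0 ≤ N.length * pvPot 0 + 4 * pvPot 0 := by
            calc acc'.length * pvPot 0 ≤ (N.length + 4) * pvPot 0 :=
                  Nat.mul_le_mul_right _ (by simpa [pvDirs] using hlen)
              _ = N.length * pvPot 0 + 4 * pvPot 0 := by ring
          have hf' : L.length * pvPot (0 + 1) + acc'.length * pvPot 0 + 1 ≤ f := by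
            simp only [List.length_cons, Nat.succ_mul] at hf
            omega
          rw [← e2]
          simpa [pvFrontLoopB, h] using ihL acc' vis' f hf'
  | succ c ihc =>
    induction L generalizing N vis fuel with
    | nil =>
      have := ihc N [] vis fuel (by simpa using hf)
      have e : (fun s : Int × Int × Int × Int => (s, (10 : Int) - ((c : Nat) : Int))) =
          (fun s : Int × Int × Int × Int => (s, (11 : Int) - (((c : Nat) : Int) + 1))) := by
        funext s; exact congrArg (Prod.mk s) (by ring)
      rw [e] at this
      simpa [pvFrontLoopB, pvLevelLoopB] using this
    | cons s L ihL =>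
      have hpos : 1 ≤ fuel := le_trans (by omega) hf
      cases fuel with
      | zero => omega
      | succ f =>
        have hle : ¬ ((10 : Int) - ((c + 1 : Nat) : Int) > 10) := by push_cast; omega
        have e2 : (fun s : Int × Int × Int × Int => (s, (11 : Int) - ((c + 1 : Nat) : Int))) =
            (fun s : Int × Int × Int × Int => (s, ((10 : Int) - ((c + 1 : Nat) : Int)) + 1)) := by
          funext s; push_cast; ring_nf
        simp only [List.map_cons, List.cons_append, pvBfsA]
        rw [if_neg hle, e2, pvDirLoop_bridge]
        cases h : pvDirLoopB g fm s.1 s.2.1 s.2.2.1 s.2.2.2 pvDirs vis N with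
        | none => simp [pvFrontLoopB, h]
        | some p =>
          obtain ⟨vis', acc'⟩ := p
          have hlen := pvDirLoopB_len pvDirs vis N vis' acc' h
          have hq : pvPot (c + 1 + 1) = 1 + 4 * pvPot (c + 1) := rfl
          have h2 : acc'.length * pvPot (c + 1) ≤ N.length * pvPot (c + 1) + 4 * pvPot (c + 1) := by
            calc acc'.length * pvPot (c + 1) ≤ (N.length + 4) * pvPot (c + 1) :=
                  Nat.mul_le_mul_right _ (by simpa [pvDirs] using hlen)
              _ = N.length * pvPot (c + 1) + 4 * pvPot (c + 1) := by ring
          have hf' : L.length * pvPot (c + 1 + 1) + acc'.length * pvPot (c + 1) + 1 ≤ f := by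
            simp only [List.length_cons, Nat.succ_mul] at hf
            omega
          rw [← e2]
          simpa [pvFrontLoopB, h] using ihL acc' vis' f hf'

-- === characterisation of the level loop's building blocks in terms of pvWinDb/pvChildD ===

theorem pvDirLoopB_cons {g : List String} {fm : Nat} {s : Int × Int × Int × Int}
    {dri dci : Int} {ds : List (Int × Int)} {vis : PySem.Set (Int × Int × Int × Int)}
    {acc : List (Int × Int × Int × Int)} :
    pvDirLoopB g fm s.1 s.2.1 s.2.2.1 s.2.2.2 ((dri, dci) :: ds) vis acc =
      if pvWinDb g fm s (dri, dci) = true then none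
      else
        match pvChildD g fm s (dri, dci) with
        | none => pvDirLoopB g fm s.1 s.2.1 s.2.2.1 s.2.2.2 ds vis acc
        | some st =>
          if st ∈ vis then pvDirLoopB g fm s.1 s.2.1 s.2.2.1 s.2.2.2 ds vis acc
          else pvDirLoopB g fm s.1 s.2.1 s.2.2.1 s.2.2.2 ds (vis.add st) (acc ++ [st]) := by
  by_cases h1 : pvLook g (pvMove g fm s.2.2.1 s.2.2.2 dri dci 0).1
      (pvMove g fm s.2.2.1 s.2.2.2 dri dci 0).2.1 = some 'O'
  · simp [pvDirLoopB, pvWinDb, pvChildD, h1]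
  · by_cases h2 : pvLook g (pvMove g fm s.1 s.2.1 dri dci 0).1
        (pvMove g fm s.1 s.2.1 dri dci 0).2.1 = some 'O'
    · simp [pvDirLoopB, pvWinDb, pvChildD, h1, h2]
    · simp [pvDirLoopB, pvWinDb, pvChildD, h1, h2]

theorem pvDirLoopB_cons_win {g : List String} {fm : Nat} {s : Int × Int × Int × Int}
    {dri dci : Int} {ds : List (Int × Int)} {vis : PySem.Set (Int × Int × Int × Int)}
    {acc : List (Int × Int × Int × Int)} (hw : pvWinDb g fm s (dri, dci) = true) :
    pvDirLoopB g fm s.1 s.2.1 s.2.2.1 s.2.2.2 ((dri, dci) :: ds) vis acc = none := by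
  rw [pvDirLoopB_cons, if_pos hw]

theorem pvDirLoopB_cons_skip {g : List String} {fm : Nat} {s : Int × Int × Int × Int}
    {dri dci : Int} {ds : List (Int × Int)} {vis : PySem.Set (Int × Int × Int × Int)}
    {acc : List (Int × Int × Int × Int)} (hw : pvWinDb g fm s (dri, dci) = false)
    (hc : pvChildD g fm s (dri, dci) = none) :
    pvDirLoopB g fm s.1 s.2.1 s.2.2.1 s.2.2.2 ((dri, dci) :: ds) vis acc =
      pvDirLoopB g fm s.1 s.2.1 s.2.2.1 s.2.2.2 ds vis acc := by
  rw [pvDirLoopB_cons, if_neg (by simp [hw]), hc]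

theorem pvDirLoopB_cons_child {g : List String} {fm : Nat} {s : Int × Int × Int × Int}
    {dri dci : Int} {ds : List (Int × Int)} {vis : PySem.Set (Int × Int × Int × Int)}
    {acc : List (Int × Int × Int × Int)} {st : Int × Int × Int × Int}
    (hw : pvWinDb g fm s (dri, dci) = false) (hc : pvChildD g fm s (dri, dci) = some st) :
    pvDirLoopB g fm s.1 s.2.1 s.2.2.1 s.2.2.2 ((dri, dci) :: ds) vis acc =
      if st ∈ vis then pvDirLoopB g fm s.1 s.2.1 s.2.2.1 s.2.2.2 ds vis acc
      else pvDirLoopB g fm s.1 s.2.1 s.2.2.1 s.2.2.2 ds (vis.add st) (acc ++ [st]) := by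
  rw [pvDirLoopB_cons, if_neg (by simp [hw]), hc]

theorem pvDirLoopB_none_iff {g : List String} {fm : Nat} {s : Int × Int × Int × Int} :
    ∀ (ds : List (Int × Int)) (vis : PySem.Set (Int × Int × Int × Int))
      (acc : List (Int × Int × Int × Int)),
      pvDirLoopB g fm s.1 s.2.1 s.2.2.1 s.2.2.2 ds vis acc = none ↔
        ∃ d ∈ ds, pvWinDb g fm s d = true := by
  intro ds
  induction ds with
  | nil => intro vis acc; simp [pvDirLoopB]
  | cons d ds ih =>
    obtain ⟨dri, dci⟩ := d
    intro vis acc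
    by_cases hw : pvWinDb g fm s (dri, dci) = true
    · rw [pvDirLoopB_cons_win hw]
      constructor
      · intro _; exact ⟨(dri, dci), List.mem_cons.mpr (Or.inl rfl), hw⟩
      · intro _; rfl
    · have hwf : pvWinDb g fm s (dri, dci) = false := by
        revert hw; cases pvWinDb g fm s (dri, dci) <;> simp
      cases hc : pvChildD g fm s (dri, dci) with
      | none => rw [pvDirLoopB_cons_skip hwf hc]; simp [ih, List.mem_cons, hwf]
      | some st =>
        rw [pvDirLoopB_cons_child hwf hc]
        by_cases hv : st ∈ vis
        · rw [if_pos hv]; simp [ih, List.mem_cons, hwf]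
        · rw [if_neg hv]; simp [ih, List.mem_cons, hwf]

theorem pvDirLoopB_facts {g : List String} {fm : Nat} {s : Int × Int × Int × Int} :
    ∀ (ds : List (Int × Int)) (vis : PySem.Set (Int × Int × Int × Int))
      (acc : List (Int × Int × Int × Int)) vis' acc',
      pvDirLoopB g fm s.1 s.2.1 s.2.2.1 s.2.2.2 ds vis acc = some (vis', acc') →
      (∀ x, x ∈ vis → x ∈ vis') ∧
      (∀ x, x ∈ acc → x ∈ acc') ∧
      (∀ x, x ∈ vis' → x ∈ vis ∨ x ∈ acc') ∧
      (∀ c, c ∈ acc' → c ∈ acc ∨ ∃ d ∈ ds, pvChildD g fm s d = some c) ∧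
      (∀ d ∈ ds, ∀ c, pvChildD g fm s d = some c → c ∈ vis') := by
  intro ds
  induction ds with
  | nil =>
    intro vis acc vis' acc' h
    simp only [pvDirLoopB, Option.some.injEq, Prod.mk.injEq] at h
    obtain ⟨h1, h2⟩ := h
    subst h1; subst h2
    exact ⟨fun x hx => hx, fun x hx => hx, fun x hx => Or.inl hx,
      fun c hc => Or.inl hc, fun d hd => by simp at hd⟩
  | cons d ds ih =>
    obtain ⟨dri, dci⟩ := d
    intro vis acc vis' acc' h
    by_cases hw : pvWinDb g fm s (dri, dci) = true
    · rw [pvDirLoopB_cons_win hw] at h; exact absurd h (by simp)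
    · have hwf : pvWinDb g fm s (dri, dci) = false := by
        revert hw; cases pvWinDb g fm s (dri, dci) <;> simp
      cases hc : pvChildD g fm s (dri, dci) with
      | none =>
        rw [pvDirLoopB_cons_skip hwf hc] at h
        obtain ⟨f1, f2, f3, f4, f5⟩ := ih vis acc vis' acc' h
        refine ⟨f1, f2, f3, ?_, ?_⟩
        · intro c hcc
          rcases f4 c hcc with h' | ⟨d', hd', hcd⟩
          · exact Or.inl h'
          · exact Or.inr ⟨d', List.mem_cons_of_mem _ hd', hcd⟩
        · intro d' hd' c hcd
          rcases List.mem_cons.mp hd' with rfl | hd'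
          · rw [hc] at hcd; cases hcd
          · exact f5 d' hd' c hcd
      | some st =>
        rw [pvDirLoopB_cons_child hwf hc] at h
        by_cases hv : st ∈ vis
        · rw [if_pos hv] at h
          obtain ⟨f1, f2, f3, f4, f5⟩ := ih vis acc vis' acc' h
          refine ⟨f1, f2, f3, ?_, ?_⟩
          · intro c hcc
            rcases f4 c hcc with h' | ⟨d', hd', hcd⟩
            · exact Or.inl h'
            · exact Or.inr ⟨d', List.mem_cons_of_mem _ hd', hcd⟩
          · intro d' hd' c hcd
            rcases List.mem_cons.mp hd' with rfl | hd'
            · have hst : st = c := by rw [hc] at hcd; exact Option.some.inj hcd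
              subst hst; exact f1 st hv
            · exact f5 d' hd' c hcd
        · rw [if_neg hv] at h
          obtain ⟨f1, f2, f3, f4, f5⟩ := ih (vis.add st) (acc ++ [st]) vis' acc' h
          have hst_acc' : st ∈ acc' := f2 st (by simp)
          have hst_vis' : st ∈ vis' := f1 st (by rw [PySem.Set.mem_add]; exact Or.inr rfl)
          refine ⟨?_, ?_, ?_, ?_, ?_⟩
          · intro x hx; exact f1 x (by rw [PySem.Set.mem_add]; exact Or.inl hx)
          · intro x hx; exact f2 x (by simp [hx])
          · intro x hx
            rcases f3 x hx with h' | h'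
            · rcases (PySem.Set.mem_add _ _ _).mp h' with h'' | h''
              · exact Or.inl h''
              · subst h''; exact Or.inr hst_acc'
            · exact Or.inr h'
          · intro c hcc
            rcases f4 c hcc with h' | ⟨d', hd', hcd⟩
            · rcases List.mem_append.mp h' with h'' | h''
              · exact Or.inl h''
              · have : c = st := by simpa using h''
                subst this
                exact Or.inr ⟨(dri, dci), List.mem_cons.mpr (Or.inl rfl), hc⟩
            · exact Or.inr ⟨d', List.mem_cons_of_mem _ hd', hcd⟩
          · intro d' hd' c hcd
            rcases List.mem_cons.mp hd' with rfl | hd'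
            · have hst : st = c := by rw [hc] at hcd; exact Option.some.inj hcd
              subst hst; exact hst_vis'
            · exact f5 d' hd' c hcd

theorem pvFrontLoopB_none_iff {g : List String} {fm : Nat} :
    ∀ (F : List (Int × Int × Int × Int)) (vis : PySem.Set (Int × Int × Int × Int))
      (acc : List (Int × Int × Int × Int)),
      pvFrontLoopB g fm F vis acc = none ↔ ∃ v ∈ F, pvWin g fm v = true := by
  intro F
  induction F with
  | nil => intro vis acc; simp [pvFrontLoopB]
  | cons v F ih =>
    intro vis acc
    simp only [pvFrontLoopB]
    cases h : pvDirLoopB g fm v.1 v.2.1 v.2.2.1 v.2.2.2 pvDirs vis acc with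
    | none =>
      have hwv : pvWin g fm v = true := by
        rw [pvWin, List.any_eq_true]
        exact (pvDirLoopB_none_iff pvDirs vis acc).mp h
      constructor
      · intro _; exact ⟨v, List.mem_cons.mpr (Or.inl rfl), hwv⟩
      · intro _; rfl
    | some p =>
      obtain ⟨vis1, acc1⟩ := p
      have hwv : pvWin g fm v = false := by
        rw [pvWin]
        apply List.any_eq_false.mpr
        intro d hd
        by_contra hne
        have hdt : pvWinDb g fm v d = true := by revert hne; cases pvWinDb g fm v d <;> simp
        exact absurd ((pvDirLoopB_none_iff pvDirs vis acc).mpr ⟨d, hd, hdt⟩) (by simp [h])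
      constructor
      · intro hnone
        obtain ⟨u, hu, hw⟩ := (ih vis1 acc1).mp hnone
        exact ⟨u, List.mem_cons_of_mem _ hu, hw⟩
      · rintro ⟨u, hu, hw⟩
        rcases List.mem_cons.mp hu with rfl | hu
        · rw [hwv] at hw; cases hw
        · exact (ih vis1 acc1).mpr ⟨u, hu, hw⟩

theorem pvFrontLoopB_facts {g : List String} {fm : Nat} :
    ∀ (F : List (Int × Int × Int × Int)) (vis : PySem.Set (Int × Int × Int × Int))
      (acc : List (Int × Int × Int × Int)) vis' acc',
      pvFrontLoopB g fm F vis acc = some (vis', acc') →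
      (∀ x, x ∈ vis → x ∈ vis') ∧
      (∀ x, x ∈ acc → x ∈ acc') ∧
      (∀ x, x ∈ vis' → x ∈ vis ∨ x ∈ acc') ∧
      (∀ c, c ∈ acc' → c ∈ acc ∨ ∃ v ∈ F, c ∈ pvChildren g fm v) ∧
      (∀ v ∈ F, ∀ c ∈ pvChildren g fm v, c ∈ vis') := by
  intro F
  induction F with
  | nil =>
    intro vis acc vis' acc' h
    simp only [pvFrontLoopB, Option.some.injEq, Prod.mk.injEq] at h
    obtain ⟨h1, h2⟩ := h
    subst h1; subst h2
    exact ⟨fun x hx => hx, fun x hx => hx, fun x hx => Or.inl hx,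
      fun c hc => Or.inl hc, fun v hv => by simp at hv⟩
  | cons v F ih =>
    intro vis acc vis' acc' h
    simp only [pvFrontLoopB] at h
    cases hd : pvDirLoopB g fm v.1 v.2.1 v.2.2.1 v.2.2.2 pvDirs vis acc with
    | none => rw [hd] at h; cases h
    | some p =>
      obtain ⟨vis1, acc1⟩ := p
      rw [hd] at h
      obtain ⟨d1, d2, d3, d4, d5⟩ := pvDirLoopB_facts pvDirs vis acc vis1 acc1 hd
      obtain ⟨f1, f2, f3, f4, f5⟩ := ih vis1 acc1 vis' acc' h
      refine ⟨fun x hx => f1 x (d1 x hx), fun x hx => f2 x (d2 x hx), ?_, ?_, ?_⟩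
      · intro x hx
        rcases f3 x hx with h' | h'
        · rcases d3 x h' with h'' | h''
          · exact Or.inl h''
          · exact Or.inr (f2 x h'')
        · exact Or.inr h'
      · intro c hcc
        rcases f4 c hcc with h' | ⟨u, hu, hc⟩
        · rcases d4 c h' with h'' | ⟨d', hd', hcd⟩
          · exact Or.inl h''
          · exact Or.inr ⟨v, List.mem_cons.mpr (Or.inl rfl),
              List.mem_filterMap.mpr ⟨d', hd', hcd⟩⟩
        · exact Or.inr ⟨u, List.mem_cons_of_mem _ hu, hc⟩
      · intro u hu c hc
        rcases List.mem_cons.mp hu with rfl | hu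
        · obtain ⟨d', hd', hcd⟩ := List.mem_filterMap.mp hc
          exact f1 c (d5 d' hd' c hcd)
        · exact f5 u hu c hc

-- === BFS with pruning decides pvWins: the covering invariant says every visited state's
-- === winning potential (within the remaining budget) is matched by a frontier state ===

theorem pvLevel_iff {g : List String} {fm : Nat} :
    ∀ (K : Nat) (vis : PySem.Set (Int × Int × Int × Int)) (F : List (Int × Int × Int × Int)),
      (∀ x ∈ F, x ∈ vis) →
      (∀ v ∈ vis, ∀ j ≤ K, pvWins g fm j v = true → ∃ u ∈ F, pvWins g fm j u = true) →
      (pvLevelLoopB g fm K vis F = true ↔ ∃ v ∈ F, pvWins g fm K v = true) := by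
  intro K
  induction K with
  | zero => intro vis F _ _; simp [pvLevelLoopB, pvWins]
  | succ K ih =>
    intro vis F hFv hcov
    simp only [pvLevelLoopB]
    cases h : pvFrontLoopB g fm F vis [] with
    | none =>
      obtain ⟨v, hv, hw⟩ := (pvFrontLoopB_none_iff F vis []).mp h
      constructor
      · intro _; exact ⟨v, hv, by rw [pvWins]; simp [hw]⟩
      · intro _; rfl
    | some p =>
      obtain ⟨vis', F'⟩ := p
      have hnw : ∀ v ∈ F, pvWin g fm v = false := by
        intro v hv
        by_contra hne
        have hvt : pvWin g fm v = true := by revert hne; cases pvWin g fm v <;> simp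
        exact absurd ((pvFrontLoopB_none_iff F vis []).mpr ⟨v, hv, hvt⟩) (by simp [h])
      obtain ⟨f1, f2, f3, f4, f5⟩ := pvFrontLoopB_facts F vis [] vis' F' h
      have hF'sub : ∀ x ∈ F', x ∈ vis' := by
        intro x hx
        rcases f4 x hx with h' | ⟨v, hv, hc⟩
        · simp at h'
        · exact f5 v hv x hc
      have pres : ∀ j, j ≤ K → ∀ v ∈ vis', pvWins g fm j v = true →
          ∃ u ∈ F', pvWins g fm j u = true := by
        intro j
        induction j using Nat.strong_induction_on with
        | _ j ihj =>
          intro hjK v hv hw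
          rcases f3 v hv with hvv | hvF'
          · obtain ⟨u, hu, hwu⟩ := hcov v hvv j (by omega) hw
            cases j with
            | zero => exact absurd hwu (by simp [pvWins])
            | succ j' =>
              rcases pvWins_noself j' u hwu with hwin | ⟨c, hc, _, hwc⟩
              · rw [hnw u hu] at hwin; cases hwin
              · have hcvis' : c ∈ vis' := f5 u hu c hc
                obtain ⟨u', hu', hw'⟩ := ihj j' (by omega) (by omega) c hcvis' hwc
                exact ⟨u', hu', pvWins_mono j' u' hw'⟩
          · exact ⟨v, hvF', hw⟩
      have hmain := ih vis' F' hF'sub (fun v hv j hj hw => pres j hj v hv hw)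
      constructor
      · intro htrue
        obtain ⟨u, hu, hwu⟩ := hmain.mp htrue
        rcases f4 u hu with h' | ⟨v, hv, hc⟩
        · simp at h'
        · refine ⟨v, hv, ?_⟩
          rw [pvWins]
          simp only [Bool.or_eq_true, List.any_eq_true]
          exact Or.inr ⟨u, hc, hwu⟩
      · rintro ⟨v, hv, hwv⟩
        rw [pvWins] at hwv
        simp only [Bool.or_eq_true, List.any_eq_true] at hwv
        rcases hwv with hwin | ⟨c, hc, hwc⟩
        · rw [hnw v hv] at hwin; cases hwin
        · obtain ⟨u, hu, hwu⟩ := pres K le_rfl c (f5 v hv c hc) hwc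
          exact hmain.mpr ⟨u, hu, hwu⟩

-- ===== VERDICT (by name: the statement is the Claim_ definition above) =====
theorem is_available_to_take_out_only_red_marble_spec : Claim_equal_is_available_to_take_out_only_red_marble := by
  intro g _hdom _hpre
  unfold Spec_is_available_to_take_out_only_red_marble
  simp only [is_available_to_take_out_only_red_marble, is_available_to_take_out_only_red_marble_alt]
  set s0 := pvScan g g.length (g.headD "").length with hs0
  have hA : pvBfsA g (pvBound g) 16777216 [(s0, 0)] (PySem.Set.ofList [s0]) =
      pvLevelLoopB g (pvBound g) 11 (PySem.Set.ofList [s0]) [s0] := by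
    have h := pvBfsA_sim (g := g) (fm := pvBound g) 10 [s0] []
        (PySem.Set.ofList [s0]) 16777216
        (by simp only [List.length_cons, List.length_nil]; decide)
    have e0 : ((10 : Int) - ((10 : Nat) : Int)) = 0 := by norm_num
    simp only [List.map_cons, List.map_nil, List.append_nil, e0] at h
    rw [h]
    rfl
  have hL : pvLevelLoopB g (pvBound g) 11 (PySem.Set.ofList [s0]) [s0] = true ↔
      pvWins g (pvBound g) 11 s0 = true := by
    have := pvLevel_iff (g := g) (fm := pvBound g) 11 (PySem.Set.ofList [s0]) [s0]
      (by intro x hx; simpa [PySem.Set.mem_ofList] using hx)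
      (by
        intro v hv j _ hw
        rw [PySem.Set.mem_ofList] at hv
        simp only [List.mem_singleton] at hv
        exact ⟨v, by simp [hv], hw⟩)
    simpa using this
  have hB : pvDfs g (pvBound g) 11 s0 = pvWins g (pvBound g) 11 s0 := pvDfs_eq_wins 11 s0
  rw [hA, hB]
  cases hW : pvWins g (pvBound g) 11 s0 with
  | true => exact hL.mpr hW
  | false =>
    cases hLL : pvLevelLoopB g (pvBound g) 11 (PySem.Set.ofList [s0]) [s0] with
    | true => rw [hW] at hL; exact absurd (hL.mp hLL) (by simp)
    | false => rfl
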